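-- pv_equiv track=rewrite | github.com/daft4jhonesjr/sistema-menino-do-alho | quotes.py | _intercalar_por_autor
-- ===== SOURCE A (Python) =====
-- from collections import defaultdict, deque
--
-- def _intercalar_por_autor(frases: list[tuple[str, str]]) -> list[tuple[str, str]]:
--     """Reordena para reduzir repetição de autor em dias consecutivos.
--
--     Estratégia:
--     - agrupa por autor preservando ordem de inserção;
--     - distribui de forma gulosa escolhendo, a cada passo, o autor com mais
--       frases restantes que não seja o mesmo da frase anterior.
--     """
--     filas_por_autor: dict[str, deque[tuple[str, str]]] = defaultdict(deque)
--     ordem_autores: list[str] = []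
--
--     for texto, autor in frases:
--         if autor not in filas_por_autor:
--             ordem_autores.append(autor)
--         filas_por_autor[autor].append((texto, autor))
--
--     pos_autor = {autor: idx for idx, autor in enumerate(ordem_autores)}
--     resultado: list[tuple[str, str]] = []
--     ultimo_autor: str | None = None
--
--     while True:
--         candidatos = [a for a, fila in filas_por_autor.items() if fila and a != ultimo_autor]
--         if not candidatos:
--             candidatos = [a for a, fila in filas_por_autor.items() if fila]
--         if not candidatos:
--             break
--
--         # Maior fila primeiro; desempate pela ordem original dos autores.
--         candidatos.sort(key=lambda a: (-len(filas_por_autor[a]), pos_autor[a]))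
--         autor_escolhido = candidatos[0]
--         resultado.append(filas_por_autor[autor_escolhido].popleft())
--         ultimo_autor = autor_escolhido
--
--     return resultado
-- ===== SOURCE B (Python) =====
-- def _intercalar_por_autor(frases: list[tuple[str, str]]) -> list[tuple[str, str]]:
--     """Same reordering via counting buckets instead of per-step candidate sorting.
--
--     Groups once, then keeps buckets[c] = positions of authors with exactly c
--     phrases left (ascending original position).  Each of the N steps reads the
--     pick straight out of the highest non-empty bucket (first position that is
--     not the previous author's, descending to lower buckets when needed) and
--     moves the picked position one bucket down - no sort, no scan over all
--     authors with a key function.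
--     """
--     grupos: dict[str, list[tuple[str, str]]] = {}
--     ordem: list[str] = []
--     for texto, autor in frases:
--         if autor not in grupos:
--             grupos[autor] = []
--             ordem.append(autor)
--         grupos[autor].append((texto, autor))
--
--     itens = [grupos[a] for a in ordem]          # remaining phrases per author position
--     maxc = max((len(g) for g in itens), default=0)
--     buckets: list[list[int]] = [[] for _ in range(maxc + 1)]
--     for pos, g in enumerate(itens):
--         buckets[len(g)].append(pos)
--
--     resultado: list[tuple[str, str]] = []
--     ultimo = -1                                  # position of the previous pick
--     topo = maxc                                  # upper bound on remaining counts
--     for _ in range(len(frases)):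
--         while not buckets[topo]:
--             topo -= 1
--         d, pos = topo, None
--         while d > 0 and pos is None:
--             for p in buckets[d]:
--                 if p != ultimo:
--                     pos = p
--                     break
--             else:
--                 d -= 1
--         if pos is None:                          # only the previous author remains
--             d, pos = topo, buckets[topo][0]
--         resultado.append(itens[pos][0])
--         itens[pos] = itens[pos][1:]
--         buckets[d].remove(pos)
--         if d > 1:
--             b = buckets[d - 1]
--             i = 0
--             while i < len(b) and b[i] < pos:
--                 i += 1
--             b.insert(i, pos)
--         ultimo = pos
--     return resultado
-- ===== Notes on version B (the rewrite author's own statement) =====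
-- stated objective: faster
-- what changed: B replaces A's per-step rescan and sort of all author queues by a counting-bucket structure (buckets[c] = author positions with c phrases left, kept in position order): each pick is read from the highest usable bucket and the picked author moves one bucket down, so no sort or key-function scan over all authors happens per step.
import Mathlib
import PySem

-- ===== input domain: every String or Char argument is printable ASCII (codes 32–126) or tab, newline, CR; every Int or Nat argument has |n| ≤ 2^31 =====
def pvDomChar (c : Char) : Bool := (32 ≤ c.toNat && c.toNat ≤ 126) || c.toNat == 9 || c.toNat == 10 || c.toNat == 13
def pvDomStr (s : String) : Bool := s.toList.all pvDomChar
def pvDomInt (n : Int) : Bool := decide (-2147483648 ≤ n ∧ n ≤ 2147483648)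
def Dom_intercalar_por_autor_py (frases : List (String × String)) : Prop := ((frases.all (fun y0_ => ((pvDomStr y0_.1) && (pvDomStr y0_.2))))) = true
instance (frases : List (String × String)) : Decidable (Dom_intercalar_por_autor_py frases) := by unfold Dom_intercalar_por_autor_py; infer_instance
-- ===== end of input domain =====

-- B replaces A's per-step rescan + sort of all author queues by counting buckets
-- (bucket c = author positions with c phrases left); same return value, proved below.

-- ===== PORT A =====
def pvStepA (st : PySem.Dict String (List (String × String)) × List String) (p : String × String) :
    PySem.Dict String (List (String × String)) × List String :=
  (st.1.modify p.2 [] (· ++ [p]), if st.1.contains p.2 then st.2 else st.2 ++ [p.2])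

def pvGroupA (frases : List (String × String)) :
    PySem.Dict String (List (String × String)) × List String :=
  frases.foldl pvStepA (PySem.Dict.empty, [])

def pvPosA (ordem : List String) : PySem.Dict String Int :=
  ordem.zipIdx.foldl (fun d p => d.insert p.1 (p.2 : Int)) PySem.Dict.empty

def pvLoopA : Nat → PySem.Dict String (List (String × String)) → PySem.Dict String Int →
    Option String → List (String × String) → List (String × String)
  | 0, _, _, _, res => res
  | fuel + 1, filas, posA, ultimo, res =>
    let cand0 := (filas.items.filter (fun af => !af.2.isEmpty && some af.1 != ultimo)).map Prod.fst
    let cand := if cand0.isEmpty then (filas.items.filter (fun af => !af.2.isEmpty)).map Prod.fst else cand0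
    if cand.isEmpty then res
    else
      match PySem.List.sorted2 cand (fun a => -((filas.getD a []).length : Int)) (fun a => posA.getD a 0) with
      | [] => res
      | esc :: _ =>
        match filas.getD esc [] with
        | [] => res
        | h :: t => pvLoopA fuel (filas.insert esc t) posA (some esc) (res ++ [h])

def intercalar_por_autor_py (frases : List (String × String)) : List (String × String) :=
  pvLoopA frases.length (pvGroupA frases).1 (pvPosA (pvGroupA frases).2) none []

-- ===== PORT B =====
-- grouping loop of Source B: grupos[autor] = [] on first sight, then append
def pvStepB (st : PySem.Dict String (List (String × String)) × List String) (p : String × String) :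
    PySem.Dict String (List (String × String)) × List String :=
  let st' := if st.1.contains p.2 then st else (st.1.insert p.2 [], st.2 ++ [p.2])
  (st'.1.modify p.2 [] (· ++ [p]), st'.2)

def pvGroupB (frases : List (String × String)) :
    PySem.Dict String (List (String × String)) × List String :=
  frases.foldl pvStepB (PySem.Dict.empty, [])

-- `while not buckets[topo]: topo -= 1`; on reachable states some bucket ≥ 1 is nonempty,
-- so the python loop never tests buckets[0]; the recursion just stops at 0.
def pvLowerTopo (buckets : List (List Int)) : Nat → Nat
  | 0 => 0
  | t + 1 => if (PySem.List.pyGetD buckets ((t : Int) + 1) []).isEmpty then pvLowerTopo buckets t else t + 1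

-- `while d > 0 and pos is None: for p in buckets[d]: if p != ultimo: pos = p; break / else d -= 1`
def pvScan (buckets : List (List Int)) (ultimo : Int) : Nat → Option (Nat × Int)
  | 0 => none
  | d + 1 =>
    match (PySem.List.pyGetD buckets ((d : Int) + 1) []).find? (fun p => p != ultimo) with
    | some p => some (d + 1, p)
    | none => pvScan buckets ultimo d

-- `i = 0; while i < len(b) and b[i] < pos: i += 1; b.insert(i, pos)` — insert before the first q ≥ pos
def pvInsPos : List Int → Int → List Int
  | [], p => [p]
  | q :: b, p => if q < p then q :: pvInsPos b p else p :: q :: b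

-- the `for _ in range(len(frases))` loop of Source B
def pvLoopBkt : Nat → List (List (String × String)) → List (List Int) → Nat → Int →
    List (String × String) → List (String × String)
  | 0, _, _, _, _, res => res
  | fuel + 1, itens, buckets, topo, ultimo, res =>
    let topo' := pvLowerTopo buckets topo
    let dp := match pvScan buckets ultimo topo' with
      | some dp => dp
      | none => (topo', (PySem.List.pyGetD buckets (topo' : Int) []).headD 0)
    let g := PySem.List.pyGetD itens dp.2 []
    let itens' := PySem.List.pySetD itens dp.2 g.tail
    let b1 := PySem.List.pySetD buckets (dp.1 : Int)
      ((PySem.List.remove? (PySem.List.pyGetD buckets (dp.1 : Int) []) dp.2).getD [])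
    let buckets' := if 1 < dp.1 then
        PySem.List.pySetD b1 ((dp.1 : Int) - 1) (pvInsPos (PySem.List.pyGetD b1 ((dp.1 : Int) - 1) []) dp.2)
      else b1
    pvLoopBkt fuel itens' buckets' topo' dp.2 (res ++ [g.headD ("", "")])

-- itens = [grupos[a] for a in ordem]
def pvItens0 (frases : List (String × String)) : List (List (String × String)) :=
  (pvGroupB frases).2.map (fun a => (pvGroupB frases).1.getD a [])

-- maxc = max((len(g) for g in itens), default=0)
def pvMaxc0 (frases : List (String × String)) : Nat :=
  ((pvItens0 frases).map List.length).foldl max 0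

-- buckets = [[] ...]; for pos, g in enumerate(itens): buckets[len(g)].append(pos)
def pvBuckets0 (frases : List (String × String)) : List (List Int) :=
  (pvItens0 frases).zipIdx.foldl
    (fun bs g => PySem.List.pySetD bs ((g.1.length : Int))
      (PySem.List.pyGetD bs ((g.1.length : Int)) [] ++ [(g.2 : Int)]))
    (List.replicate (pvMaxc0 frases + 1) [])

def intercalar_por_autor_py_alt (frases : List (String × String)) : List (String × String) :=
  pvLoopBkt frases.length (pvItens0 frases) (pvBuckets0 frases) (pvMaxc0 frases) (-1) []

-- ===== PRECONDITION & SPEC =====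
def Spec_intercalar_por_autor_py (frases : List (String × String)) (out : List (String × String)) : Prop := out = intercalar_por_autor_py_alt frases
instance (frases : List (String × String)) (out : List (String × String)) : Decidable (Spec_intercalar_por_autor_py frases out) := by unfold Spec_intercalar_por_autor_py; infer_instance

-- ===== CLAIM (what is proved, stated in full; the proofs are below) =====
def Claim_equal_intercalar_por_autor_py : Prop := ∀ (frases : List (String × String)), Dom_intercalar_por_autor_py frases → Spec_intercalar_por_autor_py frases (intercalar_por_autor_py frases)

-- ===== LEMMAS AND PROOFS =====

-- ===== proof-side definitions =====
-- intermediate worklist loop (proof-side only): the per-step argmin formulation of the greedy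
def pvLoopB : Nat → List (Int × String × List (String × String)) → Option String →
    List (String × String) → List (String × String)
  | 0, _, _, res => res
  | fuel + 1, pendentes, ultimo, res =>
    if pendentes.isEmpty then res
    else
      let outros := pendentes.filter (fun e => some e.2.1 != ultimo)
      match PySem.List.min2? (if outros.isEmpty then pendentes else outros)
          (fun e => -(e.2.2.length : Int)) (fun e => e.1) with
      | none => res
      | some e =>
        match e.2.2 with
        | [] => res
        | h :: resto =>
          let pend' := if resto.isEmpty then pendentes.filter (fun e' => e'.1 != e.1)
            else pendentes.map (fun e' => if e'.1 == e.1 then (e'.1, e'.2.1, resto) else e')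
          pvLoopB fuel pend' (some e.2.1) (res ++ [h])

def pvBase (n : Nat) : List Int := (List.range n).map (fun k : Nat => (k : Int))
def pvCnt (itens : List (List (String × String))) (q : Int) : Nat := (itens.getD q.toNat []).length
def pvPosW (itens : List (List (String × String))) (c : Nat) : List Int :=
  (pvBase itens.length).filter (fun q => pvCnt itens q = c)
def pvPend (ordem : List String) (itens : List (List (String × String))) :
    List (Int × String × List (String × String)) :=
  ((pvBase itens.length).filter (fun q => pvCnt itens q ≠ 0)).map
    (fun q => (q, ordem.getD q.toNat "", itens.getD q.toNat []))

theorem pv_head_foldl_insertBy {α : Type} (b : α → α → Bool) (xs : List α) (acc : List α) :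
    (xs.foldl (fun acc x => PySem.List.insertBy b x acc) acc).head? =
      xs.foldl (fun m x => match m with
        | none => some x
        | some m => if b x m then some x else some m) acc.head? := by
  induction xs generalizing acc with
  | nil => rfl
  | cons x xs ih =>
    simp only [List.foldl_cons, ih]
    congr 1
    cases acc with
    | nil => rfl
    | cons h t => simp only [PySem.List.insertBy]; split <;> simp_all

theorem pv_head_sorted2_eq_min2 {α : Type} (xs : List α) (k1 k2 : α → Int) :
    (PySem.List.sorted2 xs k1 k2).head? = PySem.List.min2? xs k1 k2 := by
  simpa [PySem.List.sorted2, PySem.List.min2?] using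
    pv_head_foldl_insertBy
      (fun a b => decide (k1 a < k1 b) || !decide (k1 b < k1 a) && decide (k2 a < k2 b)) xs []

theorem pv_min2_map_aux {α β : Type} (f : α → β) (k1 k2 : β → Int) (l : List α) (m : Option α) :
    (l.foldl (fun acc x => match acc with
      | none => some x
      | some ma => if (decide (k1 (f x) < k1 (f ma)) || !decide (k1 (f ma) < k1 (f x)) && decide (k2 (f x) < k2 (f ma))) then some x else some ma) m).map f =
    l.foldl (fun acc y => match acc with
      | none => some (f y)
      | some mb => if (decide (k1 (f y) < k1 mb) || !decide (k1 mb < k1 (f y)) && decide (k2 (f y) < k2 mb)) then some (f y) else some mb) (m.map f) := by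
  induction l generalizing m with
  | nil => rfl
  | cons x xs ih =>
    simp only [List.foldl_cons]
    rw [ih]
    congr 1
    cases m with
    | none => rfl
    | some ma => simp only [Option.map_some]; split <;> rfl

theorem pv_min2_map {α β : Type} (f : α → β) (l : List α) (k1 k2 : β → Int) :
    PySem.List.min2? (l.map f) k1 k2 =
      (PySem.List.min2? l (fun x => k1 (f x)) (fun x => k2 (f x))).map f := by
  unfold PySem.List.min2?
  rw [List.foldl_map]
  exact (pv_min2_map_aux f k1 k2 l none).symm

theorem pv_min2_congr_aux {α : Type} (k1 k2 k1' k2' : α → Int) (l : List α) (m : Option α)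
    (h : ∀ x ∈ l, k1 x = k1' x ∧ k2 x = k2' x)
    (hm : ∀ y, m = some y → k1 y = k1' y ∧ k2 y = k2' y) :
    l.foldl (fun acc x => match acc with
      | none => some x
      | some ma => if (decide (k1 x < k1 ma) || !decide (k1 ma < k1 x) && decide (k2 x < k2 ma)) then some x else some ma) m =
    l.foldl (fun acc x => match acc with
      | none => some x
      | some ma => if (decide (k1' x < k1' ma) || !decide (k1' ma < k1' x) && decide (k2' x < k2' ma)) then some x else some ma) m := by
  induction l generalizing m with
  | nil => rfl
  | cons x xs ih =>
    have hx := h x (List.mem_cons_self)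
    have htail : ∀ y ∈ xs, k1 y = k1' y ∧ k2 y = k2' y := fun y hy => h y (List.mem_cons_of_mem _ hy)
    cases m with
    | none =>
      simp only [List.foldl_cons]
      exact ih (some x) htail (fun y hy => by rw [← Option.some.inj hy]; exact hx)
    | some ma =>
      have hma := hm ma rfl
      simp only [List.foldl_cons, hx.1, hx.2, hma.1, hma.2]
      apply ih _ htail
      intro y hy
      split at hy
      · rw [← Option.some.inj hy]; exact hx
      · rw [← Option.some.inj hy]; exact hma

theorem pv_min2_congr {α : Type} (l : List α) (k1 k2 k1' k2' : α → Int)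
    (h : ∀ x ∈ l, k1 x = k1' x ∧ k2 x = k2' x) :
    PySem.List.min2? l k1 k2 = PySem.List.min2? l k1' k2' := by
  unfold PySem.List.min2?
  exact pv_min2_congr_aux k1 k2 k1' k2' l none h (by simp)

theorem pv_posA_getD (ordem : List String) (hnd : ordem.Nodup) (p : String × Nat)
    (hp : p ∈ ordem.zipIdx) : (pvPosA ordem).getD p.1 0 = (p.2 : Int) := by
  have hfr : ∀ a ∈ ordem.zipIdx, (PySem.Dict.empty : PySem.Dict String Int).contains a.1 = false := by
    simp [PySem.Dict.contains_empty]
  have hnd' : (ordem.zipIdx.map Prod.fst).Nodup := by rw [List.zipIdx_map_fst]; exact hnd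
  have hitems : (pvPosA ordem).items = ordem.zipIdx.map (fun p => (p.1, (p.2 : Int))) := by
    unfold pvPosA
    rw [PySem.Dict.items_foldl_insert_fresh ordem.zipIdx Prod.fst (fun p => (p.2 : Int)) _ hfr hnd']
    simp [PySem.Dict.empty]
  have hkeys : (pvPosA ordem).keys.Nodup := by
    have : (pvPosA ordem).keys = ordem := by
      show (pvPosA ordem).items.map Prod.fst = ordem
      rw [hitems, List.map_map]
      exact List.zipIdx_map_fst 0 ordem
    rw [this]; exact hnd
  exact PySem.Dict.getD_of_mem_items _ (by rw [hitems]; exact List.mem_map_of_mem hp) hkeys 0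

theorem pv_stepB_eq_stepA (st : PySem.Dict String (List (String × String)) × List String)
    (p : String × String) : pvStepB st p = pvStepA st p := by
  by_cases h : st.1.contains p.2 = true
  · simp [pvStepA, pvStepB, h]
  · have h' : st.1.contains p.2 = false := by simpa using h
    unfold pvStepA pvStepB PySem.Dict.modify
    rw [h']
    simp only [Bool.false_eq_true, if_false]
    rw [PySem.Dict.getD_insert_self, PySem.Dict.insert_insert_self,
      PySem.Dict.getD_of_not_contains st.1 [] h']

theorem pv_groupB_eq_groupA (frases : List (String × String)) : pvGroupB frases = pvGroupA frases := by
  unfold pvGroupA pvGroupB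
  rw [funext fun st => funext fun p => pv_stepB_eq_stepA st p]

theorem pv_group_inv_aux (frases : List (String × String))
    (st : PySem.Dict String (List (String × String)) × List String)
    (hk : st.1.keys = st.2) (hnd : st.2.Nodup) (hne : ∀ a ∈ st.2, st.1.getD a [] ≠ []) :
    (frases.foldl pvStepA st).1.keys = (frases.foldl pvStepA st).2 ∧
      (frases.foldl pvStepA st).2.Nodup ∧
      ∀ a ∈ (frases.foldl pvStepA st).2, (frases.foldl pvStepA st).1.getD a [] ≠ [] := by
  induction frases generalizing st with
  | nil => exact ⟨hk, hnd, hne⟩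
  | cons p frases ih =>
    rw [List.foldl_cons]
    by_cases hc : st.1.contains p.2 = true
    · apply ih
      · simp only [pvStepA, hc, if_true]
        show (st.1.modify p.2 [] (· ++ [p])).keys = st.2
        unfold PySem.Dict.modify
        rw [PySem.Dict.keys_insert_of_contains _ _ hc, hk]
      · simpa [pvStepA, hc] using hnd
      · intro a ha
        simp only [pvStepA, hc, if_true] at ha ⊢
        show (st.1.modify p.2 [] (· ++ [p])).getD a [] ≠ []
        unfold PySem.Dict.modify
        rw [PySem.Dict.getD_insert]
        split
        · simp
        · exact hne a ha
    · have hc' : st.1.contains p.2 = false := by simpa using hc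
      have hmem : p.2 ∉ st.2 := by
        rw [← hk]
        intro hmem
        rw [PySem.Dict.contains_eq_decide_mem_keys, decide_eq_true hmem] at hc'
        exact Bool.true_eq_false.mp hc'
      apply ih
      · simp only [pvStepA, hc', Bool.false_eq_true, if_false]
        show (st.1.modify p.2 [] (· ++ [p])).keys = st.2 ++ [p.2]
        unfold PySem.Dict.modify
        rw [PySem.Dict.keys_insert_of_not_contains _ _ hc', hk]
      · simp only [pvStepA, hc', Bool.false_eq_true, if_false]
        rw [List.nodup_append]
        refine ⟨hnd, List.nodup_singleton _, ?_⟩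
        intro a ha b hb
        simp only [List.mem_singleton] at hb
        exact fun hab => hmem ((hab.trans hb) ▸ ha)
      · intro a ha
        simp only [pvStepA, hc', Bool.false_eq_true, if_false] at ha ⊢
        show (st.1.modify p.2 [] (· ++ [p])).getD a [] ≠ []
        unfold PySem.Dict.modify
        rw [PySem.Dict.getD_insert]
        split
        · simp
        · rename_i hno
          have : a ∈ st.2 ++ [p.2] := ha
          rcases List.mem_append.mp this with h1 | h1
          · exact hne a h1
          · exact absurd (List.mem_singleton.mp h1) hno

theorem pv_group_inv (frases : List (String × String)) :
    (pvGroupA frases).1.keys = (pvGroupA frases).2 ∧ (pvGroupA frases).2.Nodup ∧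
      ∀ a ∈ (pvGroupA frases).2, (pvGroupA frases).1.getD a [] ≠ [] := by
  unfold pvGroupA
  exact pv_group_inv_aux frases (PySem.Dict.empty, []) rfl List.nodup_nil (by simp)

theorem pv_zip_spec {l : List String} {p : String × Nat} (hp : p ∈ l.zipIdx) :
    ∃ h : p.2 < l.length, p.1 = l[p.2] := by
  obtain ⟨a, i⟩ := p
  obtain ⟨-, h2, h3⟩ := List.mem_zipIdx hp
  exact ⟨by simpa using h2, by simpa using h3⟩

theorem pv_zip_ne {l : List String} (hnd : l.Nodup) {p q : String × Nat}
    (hp : p ∈ l.zipIdx) (hq : q ∈ l.zipIdx) (hne : p ≠ q) : p.1 ≠ q.1 ∧ p.2 ≠ q.2 := by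
  obtain ⟨a, i⟩ := p
  obtain ⟨b, j⟩ := q
  obtain ⟨hil, hie⟩ := pv_zip_spec hp
  obtain ⟨hjl, hje⟩ := pv_zip_spec hq
  simp only at hil hie hjl hje ⊢
  constructor
  · intro h1
    have h2 : i = j := (List.Nodup.getElem_inj_iff hnd).mp (hie.symm.trans (h1 ▸ hje))
    exact hne (by rw [Prod.mk.injEq]; exact ⟨h1, h2⟩)
  · intro h2
    subst h2
    have h1 : a = b := hie.trans hje.symm
    exact hne (by rw [h1])

theorem pv_zip_fst_mem {l : List String} {p : String × Nat} (hp : p ∈ l.zipIdx) : p.1 ∈ l := by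
  rw [← List.zipIdx_map_fst 0 l]
  exact List.mem_map_of_mem hp

theorem pv_loop_eq (fuel : Nat) (ordem : List String) (hnd : ordem.Nodup) :
    ∀ (filas : PySem.Dict String (List (String × String))) (ultimo : Option String)
      (res : List (String × String)), filas.keys = ordem →
    pvLoopA fuel filas (pvPosA ordem) ultimo res =
      pvLoopB fuel
        ((ordem.zipIdx.filter (fun p => !(filas.getD p.1 []).isEmpty)).map
          (fun p => ((p.2 : Int), p.1, filas.getD p.1 [])))
        ultimo res := by
  induction fuel with
  | zero => intro _ _ _ _; rfl
  | succ fuel ih =>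
    intro filas ultimo res hk
    have hndk : filas.keys.Nodup := by rw [hk]; exact hnd
    have hitems : filas.items = ordem.map (fun a => (a, filas.getD a [])) := by
      rw [PySem.Dict.items_eq_map_keys filas hndk [], hk]
    simp only [pvLoopA, pvLoopB]
    have e1 : (filas.items.filter (fun af => !af.2.isEmpty && some af.1 != ultimo)).map Prod.fst
        = (ordem.zipIdx.filter (fun p => !(filas.getD p.1 []).isEmpty && some p.1 != ultimo)).map Prod.fst := by
      rw [hitems, List.filter_map, List.map_map]
      conv_lhs => rw [← List.zipIdx_map_fst 0 ordem, List.filter_map, List.map_map]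
      rfl
    have e2 : (filas.items.filter (fun af => !af.2.isEmpty)).map Prod.fst
        = (ordem.zipIdx.filter (fun p => !(filas.getD p.1 []).isEmpty)).map Prod.fst := by
      rw [hitems, List.filter_map, List.map_map]
      conv_lhs => rw [← List.zipIdx_map_fst 0 ordem, List.filter_map, List.map_map]
      rfl
    have e3 : ((ordem.zipIdx.filter (fun p => !(filas.getD p.1 []).isEmpty)).map
          (fun p => ((p.2 : Int), p.1, filas.getD p.1 []))).filter (fun e => some e.2.1 != ultimo)
        = (ordem.zipIdx.filter (fun p => !(filas.getD p.1 []).isEmpty && some p.1 != ultimo)).map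
          (fun p => ((p.2 : Int), p.1, filas.getD p.1 [])) := by
      rw [List.filter_map, List.filter_filter]
      congr 1
      exact List.filter_congr (fun p _ => by simp [Bool.and_comm])
    rw [e1, e2, e3]
    simp only [List.isEmpty_map]
    rw [← apply_ite (List.map (Prod.fst : String × Nat → String))]
    rw [← apply_ite (List.map (fun p : String × Nat => ((p.2 : Int), p.1, filas.getD p.1 [])))]
    simp only [List.isEmpty_map]
    have hcond : (if (ordem.zipIdx.filter (fun p => !(filas.getD p.1 []).isEmpty && some p.1 != ultimo)).isEmpty
          then ordem.zipIdx.filter (fun p => !(filas.getD p.1 []).isEmpty)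
          else ordem.zipIdx.filter (fun p => !(filas.getD p.1 []).isEmpty && some p.1 != ultimo)).isEmpty
        = (ordem.zipIdx.filter (fun p => !(filas.getD p.1 []).isEmpty)).isEmpty := by
      by_cases h : (ordem.zipIdx.filter (fun p => !(filas.getD p.1 []).isEmpty && some p.1 != ultimo)).isEmpty = true
      · simp [h]
      · simp only [h, if_false, Bool.false_eq_true]
        rw [List.isEmpty_iff] at h
        obtain ⟨p, hp⟩ := List.exists_mem_of_ne_nil _ h
        obtain ⟨hpz, hpp⟩ := List.mem_filter.mp hp
        have hplive : p ∈ ordem.zipIdx.filter (fun p => !(filas.getD p.1 []).isEmpty) :=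
          List.mem_filter.mpr ⟨hpz, by have := hpp; simp only [Bool.and_eq_true] at this; exact this.1⟩
        simp [List.ne_nil_of_mem hplive]
    rw [hcond]
    by_cases hliveE : (ordem.zipIdx.filter (fun p => !(filas.getD p.1 []).isEmpty)).isEmpty = true
    · simp only [hliveE, if_true]
    · simp only [hliveE, Bool.false_eq_true, if_false]
      generalize hL : (if (ordem.zipIdx.filter (fun p => !(filas.getD p.1 []).isEmpty && some p.1 != ultimo)).isEmpty
          then ordem.zipIdx.filter (fun p => !(filas.getD p.1 []).isEmpty)
          else ordem.zipIdx.filter (fun p => !(filas.getD p.1 []).isEmpty && some p.1 != ultimo)) = L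
      have hsub : ∀ p ∈ L, p ∈ ordem.zipIdx := by
        intro p hp
        rw [← hL] at hp
        split at hp <;> exact (List.mem_filter.mp hp).1
      have hLP : ∀ p ∈ L, (filas.getD p.1 []).isEmpty = false := by
        intro p hp
        rw [← hL] at hp
        split at hp
        · simpa using (List.mem_filter.mp hp).2
        · have := (List.mem_filter.mp hp).2
          simp only [Bool.and_eq_true] at this
          simpa using this.1
      have hLne : L ≠ [] := by
        rw [← hL]
        split
        · exact fun hnil => hliveE (List.isEmpty_iff.mpr hnil)
        · rename_i hselE
          exact fun hnil => hselE (List.isEmpty_iff.mpr hnil)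
      cases hm : PySem.List.min2? L (fun p => -((filas.getD p.1 []).length : Int)) (fun p => (p.2 : Int)) with
      | none =>
        exfalso
        have hh := pv_head_sorted2_eq_min2 L (fun p => -((filas.getD p.1 []).length : Int)) (fun p => (p.2 : Int))
        rw [hm, List.head?_eq_none_iff] at hh
        exact hLne ((hh ▸ PySem.List.sorted2_perm L _ _ false).symm.eq_nil)
      | some p0 =>
        have hp0L : p0 ∈ L := by
          have hh := pv_head_sorted2_eq_min2 L (fun p => -((filas.getD p.1 []).length : Int)) (fun p => (p.2 : Int))
          rw [hm] at hh
          cases hs0 : PySem.List.sorted2 L (fun p => -((filas.getD p.1 []).length : Int)) (fun p => (p.2 : Int)) with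
          | nil => rw [hs0] at hh; exact absurd hh (by simp)
          | cons x xs =>
            rw [hs0] at hh
            have hx : x = p0 := by simpa using hh
            have : x ∈ PySem.List.sorted2 L (fun p => -((filas.getD p.1 []).length : Int)) (fun p => (p.2 : Int)) := by
              rw [hs0]; exact List.mem_cons_self
            exact hx ▸ (PySem.List.sorted2_perm L _ _ false).mem_iff.mp this
        have hp0Z : p0 ∈ ordem.zipIdx := hsub p0 hp0L
        have hq0 : (filas.getD p0.1 []).isEmpty = false := hLP p0 hp0L
        obtain ⟨h1, t, hq⟩ : ∃ h1 t, filas.getD p0.1 [] = h1 :: t := by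
          cases hqq : filas.getD p0.1 [] with
          | nil => rw [hqq] at hq0; simp at hq0
          | cons x xs => exact ⟨x, xs, rfl⟩
        have hAhead : (PySem.List.sorted2 (L.map Prod.fst) (fun a => -((filas.getD a []).length : Int))
            (fun a => (pvPosA ordem).getD a 0)).head? = some p0.1 := by
          have ha1 := pv_head_sorted2_eq_min2 (L.map Prod.fst) (fun a => -((filas.getD a []).length : Int))
            (fun a => (pvPosA ordem).getD a 0)
          have ha2 := pv_min2_map Prod.fst L (fun a => -((filas.getD a []).length : Int))
            (fun a => (pvPosA ordem).getD a 0)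
          have ha3 := pv_min2_congr L (fun x : String × Nat => -((filas.getD x.1 []).length : Int))
            (fun x : String × Nat => (pvPosA ordem).getD x.1 0)
            (fun p => -((filas.getD p.1 []).length : Int)) (fun p => (p.2 : Int))
            (fun x hx => ⟨rfl, pv_posA_getD ordem hnd x (hsub x hx)⟩)
          exact ha1.trans (ha2.trans (congrArg (Option.map Prod.fst) (ha3.trans hm)))
        have hBmin : PySem.List.min2? (L.map (fun p : String × Nat => ((p.2 : Int), p.1, filas.getD p.1 [])))
            (fun e => -(e.2.2.length : Int)) (fun e => e.1)
            = some ((p0.2 : Int), p0.1, filas.getD p0.1 []) := by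
          have hb2 := pv_min2_map (fun p : String × Nat => ((p.2 : Int), p.1, filas.getD p.1 [])) L
            (fun e => -(e.2.2.length : Int)) (fun e => e.1)
          exact hb2.trans (congrArg (Option.map _) hm)
        cases hs : PySem.List.sorted2 (L.map Prod.fst) (fun a => -((filas.getD a []).length : Int))
            (fun a => (pvPosA ordem).getD a 0) with
        | nil => rw [hs] at hAhead; exact absurd hAhead (by simp)
        | cons esc rest =>
          rw [hs] at hAhead
          have hesc : esc = p0.1 := by simpa using hAhead
          subst hesc
          rw [hBmin, hq]
          dsimp only
          rw [hq]
          dsimp only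
          have hcont : filas.contains p0.1 = true := by
            rw [PySem.Dict.contains_eq_decide_mem_keys, hk]
            exact decide_eq_true (pv_zip_fst_mem hp0Z)
          have hk' : (filas.insert p0.1 t).keys = ordem := by
            rw [PySem.Dict.keys_insert_of_contains filas t hcont, hk]
          rw [ih (filas.insert p0.1 t) (some p0.1) (res ++ [h1]) hk']
          congr 1
          by_cases ht : t.isEmpty = true
          · have ht' : t = [] := List.isEmpty_iff.mp ht
            simp only [ht, if_true]
            rw [List.filter_map, List.filter_filter]
            rw [show ordem.zipIdx.filter (fun p => !((filas.insert p0.1 t).getD p.1 []).isEmpty)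
                = ordem.zipIdx.filter (fun p =>
                    ((fun e' : Int × String × List (String × String) => e'.1 != (p0.2 : Int)) ∘
                      (fun p : String × Nat => ((p.2 : Int), p.1, filas.getD p.1 []))) p
                    && !(filas.getD p.1 []).isEmpty) from
              List.filter_congr (fun p hp => by
                by_cases hpp : p = p0
                · subst hpp
                  simp [PySem.Dict.getD_insert_self, ht, Function.comp]
                · obtain ⟨hne1, hne2⟩ := pv_zip_ne hnd hp hp0Z hpp
                  simp [PySem.Dict.getD_insert, hne1, Function.comp, hne2])]
            apply List.map_congr_left
            intro p hp
            obtain ⟨hpZ, hpc⟩ := List.mem_filter.mp hp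
            have hpp : p ≠ p0 := by
              intro hc
              subst hc
              simp [Function.comp] at hpc
            have hne1 := (pv_zip_ne hnd hpZ hp0Z hpp).1
            simp [PySem.Dict.getD_insert, hne1]
          · have ht' : t.isEmpty = false := by simpa using ht
            simp only [ht', Bool.false_eq_true, if_false]
            rw [List.map_map]
            rw [show ordem.zipIdx.filter (fun p => !((filas.insert p0.1 t).getD p.1 []).isEmpty)
                = ordem.zipIdx.filter (fun p => !(filas.getD p.1 []).isEmpty) from
              List.filter_congr (fun p hp => by
                by_cases hpp : p = p0
                · subst hpp
                  simp [PySem.Dict.getD_insert_self, ht', hq]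
                · obtain ⟨hne1, hne2⟩ := pv_zip_ne hnd hp hp0Z hpp
                  simp [PySem.Dict.getD_insert, hne1])]
            apply List.map_congr_left
            intro p hp
            obtain ⟨hpZ, hpc⟩ := List.mem_filter.mp hp
            by_cases hpp : p = p0
            · subst hpp
              simp [PySem.Dict.getD_insert_self, Function.comp]
            · obtain ⟨hne1, hne2⟩ := pv_zip_ne hnd hpZ hp0Z hpp
              simp [PySem.Dict.getD_insert, hne1, Function.comp, hne2]


-- A's loop equals the worklist (argmin) intermediate loop, started on the grouped state
theorem pv_A_eq_mid (frases : List (String × String)) :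
    intercalar_por_autor_py frases = pvLoopB frases.length
      (((pvGroupA frases).2.zipIdx.filter (fun p => !((pvGroupA frases).1.getD p.1 []).isEmpty)).map
        (fun p => ((p.2 : Int), p.1, (pvGroupA frases).1.getD p.1 [])))
      none [] := by
  unfold intercalar_por_autor_py
  obtain ⟨hk, hnd, hne⟩ := pv_group_inv frases
  exact pv_loop_eq frases.length (pvGroupA frases).2 hnd (pvGroupA frases).1 none [] hk

-- ===== generic lemmas =====
theorem pv_sum_set (l : List Nat) (k a : Nat) (h : k < l.length) :
    (l.set k a).sum + l.getD k 0 = l.sum + a := by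
  induction l generalizing k with
  | nil => simp at h
  | cons x xs ih =>
    cases k with
    | zero => simp [List.getD]; omega
    | succ k =>
      have := ih k (by simpa using h)
      simp only [List.set, List.sum_cons, List.getD_cons_succ]
      omega

def pvMinStep {α : Type} (k1 k2 : α → Int) (acc : Option α) (x : α) : Option α :=
  match acc with
  | none => some x
  | some ma => if (decide (k1 x < k1 ma) || !decide (k1 ma < k1 x) && decide (k2 x < k2 ma)) then some x else some ma

theorem pv_min2_strict_aux {α : Type} (k1 k2 : α → Int) (x : α) :
    ∀ (l : List α) (m : Option α),
    (∀ y ∈ l, y = x ∨ (k1 x < k1 y ∨ (k1 x = k1 y ∧ k2 x < k2 y))) →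
    (m = some x ∨ (x ∈ l ∧ ∀ z, m = some z → (k1 x < k1 z ∨ (k1 x = k1 z ∧ k2 x < k2 z)))) →
    l.foldl (pvMinStep k1 k2) m = some x := by
  have hbT : ∀ u v : α, (k1 u < k1 v ∨ (k1 u = k1 v ∧ k2 u < k2 v)) →
      pvMinStep k1 k2 (some v) u = some u := by
    intro u v hv
    rcases hv with hv | ⟨hv1, hv2⟩
    · simp [pvMinStep, hv]
    · simp [pvMinStep, hv1, hv2, lt_irrefl]
  have hbF : ∀ u v : α, (k1 u < k1 v ∨ (k1 u = k1 v ∧ k2 u < k2 v)) →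
      pvMinStep k1 k2 (some u) v = some u := by
    intro u v hv
    rcases hv with hv | ⟨hv1, hv2⟩
    · simp [pvMinStep, hv, lt_asymm hv, le_of_lt hv]
    · simp [pvMinStep, hv1, lt_irrefl, hv2, lt_asymm hv2, le_of_lt hv2]
  have hbS : ∀ u : α, pvMinStep k1 k2 (some u) u = some u := by
    intro u; simp [pvMinStep, lt_irrefl]
  intro l
  induction l with
  | nil =>
    intro m hall hm
    rcases hm with hm | ⟨hx, _⟩
    · simpa using hm
    · simp at hx
  | cons y t ih =>
    intro m hall hm
    simp only [List.foldl_cons]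
    have hally := hall y (List.mem_cons_self)
    have hallt : ∀ z ∈ t, z = x ∨ (k1 x < k1 z ∨ (k1 x = k1 z ∧ k2 x < k2 z)) :=
      fun z hz => hall z (List.mem_cons_of_mem _ hz)
    rcases hm with hm | ⟨hx, hz⟩
    · subst hm
      rcases hally with hy | hy
      · subst hy
        rw [hbS y]
        exact ih (some y) hallt (Or.inl rfl)
      · rw [hbF x y hy]
        exact ih (some x) hallt (Or.inl rfl)
    · rcases hally with hy | hy
      · subst hy
        cases m with
        | none =>
          show List.foldl (pvMinStep k1 k2) (some y) t = some y
          exact ih (some y) hallt (Or.inl rfl)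
        | some z =>
          have hlz := hz z rfl
          rw [show pvMinStep k1 k2 (some z) y = some y from hbT y z hlz]
          exact ih (some y) hallt (Or.inl rfl)
      · have hxt : x ∈ t := by
          rcases List.mem_cons.mp hx with h1 | h1
          · exfalso; subst h1
            rcases hy with hv | ⟨hv1, hv2⟩
            · exact lt_irrefl _ hv
            · exact lt_irrefl _ hv2
          · exact h1
        cases m with
        | none =>
          show List.foldl (pvMinStep k1 k2) (some y) t = some x
          exact ih (some y) hallt (Or.inr ⟨hxt, fun w hw => by
            injection hw with hww; subst hww; exact hy⟩)
        | some z =>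
          have hlz := hz z rfl
          have : pvMinStep k1 k2 (some z) y = some y ∨ pvMinStep k1 k2 (some z) y = some z := by
            simp only [pvMinStep]
            by_cases hb : (decide (k1 y < k1 z) || !decide (k1 z < k1 y) && decide (k2 y < k2 z)) = true
            · left; rw [if_pos hb]
            · right; rw [if_neg hb]
          rcases this with hstep | hstep
          · rw [hstep]
            exact ih (some y) hallt (Or.inr ⟨hxt, fun w hw => by
              injection hw with hww; subst hww; exact hy⟩)
          · rw [hstep]
            exact ih (some z) hallt (Or.inr ⟨hxt, fun w hw => by
              injection hw with hww; subst hww; exact hlz⟩)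

theorem pv_min2_strict {α : Type} (l : List α) (k1 k2 : α → Int) (x : α) (hx : x ∈ l)
    (h : ∀ y ∈ l, y ≠ x → k1 x < k1 y ∨ (k1 x = k1 y ∧ k2 x < k2 y)) :
    PySem.List.min2? l k1 k2 = some x := by
  have hfold : PySem.List.min2? l k1 k2 = l.foldl (pvMinStep k1 k2) none := by
    unfold PySem.List.min2? pvMinStep
    rfl
  rw [hfold]
  exact pv_min2_strict_aux k1 k2 x l none
    (fun y hy => by
      by_cases hyx : y = x
      · exact Or.inl hyx
      · exact Or.inr (h y hy hyx))
    (Or.inr ⟨hx, fun z hz => by simp at hz⟩)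

theorem pv_lower_spec (buckets : List (List Int)) (topo : Nat)
    (h : ∀ c : Nat, topo < c → PySem.List.pyGetD buckets (c : Int) [] = []) :
    pvLowerTopo buckets topo ≤ topo ∧
    (∀ c : Nat, pvLowerTopo buckets topo < c → PySem.List.pyGetD buckets (c : Int) [] = []) ∧
    (PySem.List.pyGetD buckets ((pvLowerTopo buckets topo : Nat) : Int) [] ≠ [] ∨ pvLowerTopo buckets topo = 0) := by
  induction topo with
  | zero => exact ⟨le_refl _, h, Or.inr rfl⟩
  | succ t ih =>
    simp only [pvLowerTopo]
    by_cases he : (PySem.List.pyGetD buckets ((t : Int) + 1) []).isEmpty = true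
    · rw [if_pos he]
      have he' : PySem.List.pyGetD buckets (((t + 1 : Nat) : Int)) [] = [] := by
        rw [List.isEmpty_iff] at he
        rw [show (((t + 1 : Nat)) : Int) = (t : Int) + 1 by push_cast; ring]
        exact he
      have h' : ∀ c : Nat, t < c → PySem.List.pyGetD buckets (c : Int) [] = [] := by
        intro c hc
        rcases Nat.lt_or_ge c (t + 2) with hc2 | hc2
        · have : c = t + 1 := by omega
          rw [this]; exact he'
        · exact h c (by omega)
      obtain ⟨i1, i2, i3⟩ := ih h'
      exact ⟨le_trans i1 (by omega), i2, i3⟩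
    · rw [if_neg he]
      refine ⟨le_refl _, h, Or.inl ?_⟩
      rw [show (((t + 1 : Nat)) : Int) = (t : Int) + 1 by push_cast; ring]
      simpa [List.isEmpty_iff] using he

theorem pv_scan_some (buckets : List (List Int)) (ultimo : Int) (t : Nat) (d : Nat) (p : Int)
    (h : pvScan buckets ultimo t = some (d, p)) :
    1 ≤ d ∧ d ≤ t ∧ (PySem.List.pyGetD buckets (d : Int) []).find? (fun q => q != ultimo) = some p ∧
    (∀ c : Nat, d < c → c ≤ t → ∀ q ∈ PySem.List.pyGetD buckets (c : Int) [], q = ultimo) := by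
  induction t with
  | zero => simp [pvScan] at h
  | succ t ih =>
    simp only [pvScan] at h
    cases hf : (PySem.List.pyGetD buckets ((t : Int) + 1) []).find? (fun q => q != ultimo) with
    | some p' =>
      rw [hf] at h
      have h' : (t + 1, p') = (d, p) := Option.some.inj h
      cases h'
      refine ⟨by omega, le_refl _, ?_, ?_⟩
      · rw [show (((t + 1 : Nat)) : Int) = (t : Int) + 1 by push_cast; ring]; exact hf
      · intro c hc1 hc2; exact absurd (lt_of_lt_of_le hc1 hc2) (lt_irrefl _)
    | none =>
      rw [hf] at h
      obtain ⟨i1, i2, i3, i4⟩ := ih h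
      refine ⟨i1, by omega, i3, ?_⟩
      intro c hc1 hc2 q hq
      rcases Nat.lt_or_ge c (t + 1) with hc3 | hc3
      · exact i4 c hc1 (by omega) q hq
      · have hce : c = t + 1 := by omega
        subst hce
        rw [show (((t + 1 : Nat)) : Int) = (t : Int) + 1 by push_cast; ring] at hq
        have := List.find?_eq_none.mp hf q hq
        simpa using this

theorem pv_scan_none (buckets : List (List Int)) (ultimo : Int) (t : Nat)
    (h : pvScan buckets ultimo t = none) :
    ∀ c : Nat, 1 ≤ c → c ≤ t → ∀ q ∈ PySem.List.pyGetD buckets (c : Int) [], q = ultimo := by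
  induction t with
  | zero => intro c hc1 hc2; omega
  | succ t ih =>
    simp only [pvScan] at h
    cases hf : (PySem.List.pyGetD buckets ((t : Int) + 1) []).find? (fun q => q != ultimo) with
    | some p' => rw [hf] at h; simp at h
    | none =>
      rw [hf] at h
      intro c hc1 hc2 q hq
      rcases Nat.lt_or_ge c (t + 1) with hc3 | hc3
      · exact ih h c hc1 (by omega) q hq
      · have hce : c = t + 1 := by omega
        subst hce
        rw [show (((t + 1 : Nat)) : Int) = (t : Int) + 1 by push_cast; ring] at hq
        have := List.find?_eq_none.mp hf q hq
        simpa using this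

theorem pv_erase_filter (l : List Int) (hnd : l.Nodup) (P : Int → Bool) (p : Int) (hP : P p = true) :
    (l.filter P).erase p = l.filter (fun q => P q && !(q == p)) := by
  induction l with
  | nil => rfl
  | cons x t ih =>
    have hnd' := (List.nodup_cons.mp hnd).2
    have hxt := (List.nodup_cons.mp hnd).1
    by_cases hPx : P x = true
    · rw [List.filter_cons_of_pos hPx]
      by_cases hxp : x = p
      · subst hxp
        rw [List.erase_cons_head]
        rw [List.filter_cons_of_neg (by simp [hPx])]
        exact (List.filter_congr (fun q hq => by
          have hqx : q ≠ x := fun hc => hxt (hc ▸ hq)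
          simp [hqx])).symm
      · rw [List.erase_cons_tail (by simp [hxp])]
        rw [List.filter_cons_of_pos (by simp [hPx, hxp])]
        rw [ih hnd']
    · rw [List.filter_cons_of_neg (by simp [hPx])]
      rw [List.filter_cons_of_neg (by simp [hPx])]
      exact ih hnd'

theorem pv_insPos_filter (l : List Int) (hs : l.Pairwise (· < ·)) (P : Int → Bool) (p : Int)
    (hmem : p ∈ l) (hP : P p = false) :
    pvInsPos (l.filter P) p = l.filter (fun q => P q || q == p) := by
  induction l with
  | nil => simp at hmem
  | cons x t ih =>
    have hlt : ∀ q ∈ t, x < q := fun q hq => (List.pairwise_cons.mp hs).1 q hq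
    have hs' := (List.pairwise_cons.mp hs).2
    by_cases hxp : x = p
    · subst hxp
      rw [List.filter_cons_of_neg (by simp [hP])]
      rw [List.filter_cons_of_pos (by simp)]
      have htf : List.filter (fun q => P q || q == x) t = List.filter P t := by
        apply List.filter_congr
        intro q hq
        have : q ≠ x := fun hc => absurd (hlt q hq) (by rw [hc]; exact lt_irrefl _)
        simp [this]
      rw [htf]
      cases hft : List.filter P t with
      | nil => rfl
      | cons y r =>
        have hy : y ∈ t := List.mem_of_mem_filter (by rw [hft]; exact List.mem_cons_self)
        have : ¬ (y < x) := by have := hlt y hy; omega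
        simp only [pvInsPos]
        rw [if_neg this]
    · have hpt : p ∈ t := by
        rcases List.mem_cons.mp hmem with h1 | h1
        · exact absurd h1.symm hxp
        · exact h1
      have hxpe : x < p := hlt p hpt
      by_cases hPx : P x = true
      · rw [List.filter_cons_of_pos hPx, List.filter_cons_of_pos (by simp [hPx])]
        simp only [pvInsPos]
        rw [if_pos hxpe]
        rw [ih hs' hpt]
      · rw [List.filter_cons_of_neg (by simp [hPx]),
          List.filter_cons_of_neg (by simp [hPx, hxp])]
        exact ih hs' hpt

theorem pv_getD_set {α : Type} (l : List α) (k : Nat) (t d : α) (hk : k < l.length) (j : Nat) :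
    (l.set k t).getD j d = if j = k then t else l.getD j d := by
  rw [List.getD_eq_getElem?_getD, List.getD_eq_getElem?_getD, List.getElem?_set]
  by_cases hjk : j = k
  · rw [if_pos hjk.symm, if_pos hk, if_pos hjk]; rfl
  · rw [if_neg (fun hc => hjk hc.symm), if_neg hjk]

theorem pv_zipIdx_eq {α : Type} (l : List α) (d : α) :
    l.zipIdx = (List.range l.length).map (fun k => (l.getD k d, k)) := by
  apply List.ext_getElem (by simp)
  intro i h1 h2
  simp only [List.getElem_zipIdx, List.getElem_map, List.getElem_range]
  rw [List.getD_eq_getElem l d (by simpa using h1)]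
  simp

theorem pv_le_foldl_max (l : List Nat) (a : Nat) :
    (∀ x ∈ l, x ≤ l.foldl max a) ∧ a ≤ l.foldl max a := by
  induction l generalizing a with
  | nil => exact ⟨by simp, le_refl _⟩
  | cons x t ih =>
    obtain ⟨i1, i2⟩ := ih (max a x)
    refine ⟨?_, le_trans (le_max_left a x) i2⟩
    intro y hy
    rcases List.mem_cons.mp hy with h1 | h1
    · subst h1; exact le_trans (le_max_right a y) i2
    · exact i1 y h1

theorem pv_sum_bump (l : List String) (hnd : l.Nodup) (a : String) (ha : a ∈ l)
    (f g : String → Nat) (hfg : ∀ x ∈ l, x ≠ a → g x = f x) (hga : g a = f a + 1) :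
    (l.map g).sum = (l.map f).sum + 1 := by
  induction l with
  | nil => simp at ha
  | cons x t ih =>
    have hxt := (List.nodup_cons.mp hnd).1
    have hnd' := (List.nodup_cons.mp hnd).2
    by_cases hxa : x = a
    · subst hxa
      have : t.map g = t.map f := List.map_congr_left (fun q hq => hfg q (List.mem_cons_of_mem _ hq) (fun hc => hxt (hc ▸ hq)))
      simp only [List.map_cons, List.sum_cons, this, hga]
      omega
    · have hat : a ∈ t := by
        rcases List.mem_cons.mp ha with h1 | h1
        · exact absurd h1.symm hxa
        · exact h1
      have := ih hnd' hat (fun q hq hqa => hfg q (List.mem_cons_of_mem _ hq) hqa)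
      simp only [List.map_cons, List.sum_cons, this, hfg x (List.mem_cons_self) hxa]
      omega

-- ===== pvBase / pvPosW / pvPend facts =====
theorem pv_mem_base {n : Nat} {q : Int} : q ∈ pvBase n ↔ ∃ k : Nat, k < n ∧ q = (k : Int) := by
  simp [pvBase, List.mem_range, eq_comm]

theorem pv_base_pairwise (n : Nat) : (pvBase n).Pairwise (· < ·) := by
  have h : ((List.range n).map (fun k : Nat => (k : Int))).Pairwise (fun a b => a < b) :=
    List.Pairwise.map _ (fun a b h => Int.ofNat_lt.mpr h) List.pairwise_lt_range
  unfold pvBase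
  exact h

theorem pv_mem_posW {itens : List (List (String × String))} {c : Nat} {q : Int} :
    q ∈ pvPosW itens c ↔ ∃ k : Nat, k < itens.length ∧ q = (k : Int) ∧ (itens.getD k []).length = c := by
  unfold pvPosW pvCnt
  rw [List.mem_filter]
  constructor
  · rintro ⟨hb, hc⟩
    obtain ⟨k, hk, hq⟩ := pv_mem_base.mp hb
    refine ⟨k, hk, hq, ?_⟩
    have : q.toNat = k := by rw [hq]; exact Int.toNat_natCast k
    rw [← this]
    simpa using hc
  · rintro ⟨k, hk, hq, hc⟩
    refine ⟨pv_mem_base.mpr ⟨k, hk, hq⟩, ?_⟩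
    have : q.toNat = k := by rw [hq]; exact Int.toNat_natCast k
    rw [this]
    simpa using hc

theorem pv_posW_pairwise (itens : List (List (String × String))) (c : Nat) :
    (pvPosW itens c).Pairwise (· < ·) := (pv_base_pairwise _).filter _

theorem pv_mem_pend {ordem : List String} {itens : List (List (String × String))}
    {e : Int × String × List (String × String)} :
    e ∈ pvPend ordem itens ↔ ∃ k : Nat, k < itens.length ∧ itens.getD k [] ≠ [] ∧
      e = ((k : Int), ordem.getD k "", itens.getD k []) := by
  unfold pvPend pvCnt
  rw [List.mem_map]
  constructor
  · rintro ⟨q, hq, he⟩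
    obtain ⟨hb, hc⟩ := List.mem_filter.mp hq
    obtain ⟨k, hk, hqk⟩ := pv_mem_base.mp hb
    have htn : q.toNat = k := by rw [hqk]; exact Int.toNat_natCast k
    refine ⟨k, hk, ?_, ?_⟩
    · rw [← htn]; simpa [List.length_eq_zero_iff] using hc
    · rw [← he, htn, hqk]
  · rintro ⟨k, hk, hne, he⟩
    refine ⟨(k : Int), List.mem_filter.mpr ⟨pv_mem_base.mpr ⟨k, hk, rfl⟩, ?_⟩, ?_⟩
    · simpa [Int.toNat_natCast, List.length_eq_zero_iff] using hne
    · rw [he]; simp [Int.toNat_natCast]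

theorem pv_cnt_natCast (itens : List (List (String × String))) (j : Nat) :
    pvCnt itens (j : Int) = (itens.getD j []).length := by
  unfold pvCnt; rw [Int.toNat_natCast]

theorem pv_cnt_set (itens : List (List (String × String))) (k : Nat) (hk : k < itens.length)
    (t : List (String × String)) (j : Nat) :
    pvCnt (itens.set k t) (j : Int) = if j = k then t.length else pvCnt itens (j : Int) := by
  rw [pv_cnt_natCast, pv_cnt_natCast, pv_getD_set itens k t [] hk j, apply_ite List.length]

theorem pv_beq_cast_false {j k : Nat} (h : j ≠ k) : (((j : Int)) == ((k : Int))) = false := by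
  simp only [beq_eq_false_iff_ne]
  exact_mod_cast h

theorem pv_pend_upd_tail (ordem : List String) (itens : List (List (String × String)))
    (k : Nat) (hk : k < itens.length) (t : List (String × String)) (ht : t ≠ []) (hne : itens.getD k [] ≠ []) :
    pvPend ordem (itens.set k t) =
      (pvPend ordem itens).map (fun e' => if e'.1 == (k : Int) then (e'.1, e'.2.1, t) else e') := by
  unfold pvPend
  rw [List.map_map, List.length_set]
  have hfc : List.filter (fun q => decide (pvCnt (itens.set k t) q ≠ 0)) (pvBase itens.length)
      = List.filter (fun q => decide (pvCnt itens q ≠ 0)) (pvBase itens.length) := by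
    apply List.filter_congr
    intro q hq
    obtain ⟨j, hj, hqj⟩ := pv_mem_base.mp hq
    subst hqj
    rw [pv_cnt_set itens k hk t j]
    by_cases hjk : j = k
    · subst hjk
      rw [if_pos rfl]
      have h1 : t.length ≠ 0 := by simpa [List.length_eq_zero_iff] using ht
      have h2 : pvCnt itens (j : Int) ≠ 0 := by
        rw [pv_cnt_natCast]
        simpa [List.length_eq_zero_iff] using hne
      simp [h1, h2]
    · rw [if_neg hjk]
  rw [hfc]
  apply List.map_congr_left
  intro q hq
  obtain ⟨j, hj, hqj⟩ := pv_mem_base.mp (List.mem_filter.mp hq).1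
  subst hqj
  simp only [Function.comp, Int.toNat_natCast, pv_getD_set itens k t [] hk j]
  by_cases hjk : j = k
  · subst hjk
    simp
  · rw [if_neg hjk, if_neg (by rw [pv_beq_cast_false hjk]; exact Bool.false_ne_true)]

theorem pv_pend_upd_nil (ordem : List String) (itens : List (List (String × String)))
    (k : Nat) (hk : k < itens.length) :
    pvPend ordem (itens.set k ([] : List (String × String))) =
      (pvPend ordem itens).filter (fun e' => e'.1 != (k : Int)) := by
  unfold pvPend
  rw [List.filter_map, List.filter_filter, List.length_set]
  have hfc : List.filter (fun q => decide (pvCnt (itens.set k []) q ≠ 0)) (pvBase itens.length)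
      = List.filter (fun q => ((fun e' : Int × String × List (String × String) => e'.1 != (k : Int)) ∘
            (fun q : Int => (q, ordem.getD q.toNat "", itens.getD q.toNat []))) q &&
          decide (pvCnt itens q ≠ 0)) (pvBase itens.length) := by
    apply List.filter_congr
    intro q hq
    obtain ⟨j, hj, hqj⟩ := pv_mem_base.mp hq
    subst hqj
    rw [pv_cnt_set itens k hk [] j]
    by_cases hjk : j = k
    · subst hjk
      rw [if_pos rfl]
      simp [Function.comp]
    · rw [if_neg hjk]
      have hb := pv_beq_cast_false hjk
      simp [Function.comp, bne, hb]
  rw [hfc]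
  apply List.map_congr_left
  intro q hq
  obtain ⟨j, hj, hqj⟩ := pv_mem_base.mp (List.mem_filter.mp hq).1
  subst hqj
  have hjk : j ≠ k := by
    intro hc
    subst hc
    have h2 := (List.mem_filter.mp hq).2
    simp [Function.comp] at h2
  simp only [Int.toNat_natCast, pv_getD_set itens k [] [] hk j, if_neg hjk]

theorem pv_posW_set_other (itens : List (List (String × String))) (k : Nat) (hk : k < itens.length)
    (t : List (String × String)) (c : Nat) (hc1 : c ≠ (itens.getD k []).length) (hc2 : c ≠ t.length) :
    pvPosW (itens.set k t) c = pvPosW itens c := by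
  unfold pvPosW
  rw [List.length_set]
  apply List.filter_congr
  intro q hq
  obtain ⟨j, hj, hqj⟩ := pv_mem_base.mp hq
  subst hqj
  rw [pv_cnt_set itens k hk t j]
  by_cases hjk : j = k
  · subst hjk
    rw [if_pos rfl, pv_cnt_natCast]
    rw [decide_eq_false (Ne.symm hc2), decide_eq_false (Ne.symm hc1)]
  · rw [if_neg hjk]

theorem pv_posW_set_old (itens : List (List (String × String))) (k : Nat) (hk : k < itens.length)
    (t : List (String × String)) (ht : t.length ≠ (itens.getD k []).length) :
    pvPosW (itens.set k t) ((itens.getD k []).length) = (pvPosW itens ((itens.getD k []).length)).erase ((k : Int)) := by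
  unfold pvPosW
  rw [pv_erase_filter (pvBase itens.length) ((pv_base_pairwise _).nodup) _ (k : Int)
    (by rw [decide_eq_true_eq, pv_cnt_natCast])]
  rw [List.length_set]
  apply List.filter_congr
  intro q hq
  obtain ⟨j, hj, hqj⟩ := pv_mem_base.mp hq
  subst hqj
  rw [pv_cnt_set itens k hk t j]
  by_cases hjk : j = k
  · subst hjk
    rw [if_pos rfl, decide_eq_false ht]
    simp
  · rw [if_neg hjk]
    have hb := pv_beq_cast_false hjk
    simp [hb]

theorem pv_posW_set_new (itens : List (List (String × String))) (k : Nat) (hk : k < itens.length)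
    (t : List (String × String)) (ht : t.length ≠ (itens.getD k []).length) :
    pvPosW (itens.set k t) t.length = pvInsPos (pvPosW itens t.length) ((k : Int)) := by
  unfold pvPosW
  rw [pv_insPos_filter (pvBase itens.length) (pv_base_pairwise _) _ (k : Int)
    (pv_mem_base.mpr ⟨k, hk, rfl⟩)
    (by rw [decide_eq_false_iff_not, pv_cnt_natCast]; exact fun hc => ht hc.symm)]
  rw [List.length_set]
  apply List.filter_congr
  intro q hq
  obtain ⟨j, hj, hqj⟩ := pv_mem_base.mp hq
  subst hqj
  rw [pv_cnt_set itens k hk t j]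
  by_cases hjk : j = k
  · subst hjk
    rw [if_pos rfl]
    simp
  · rw [if_neg hjk]
    have hb := pv_beq_cast_false hjk
    simp [hb]

theorem pv_exists_live (itens : List (List (String × String))) (h : (itens.map List.length).sum ≠ 0) :
    ∃ k : Nat, k < itens.length ∧ itens.getD k [] ≠ [] := by
  induction itens with
  | nil => simp at h
  | cons g t ih =>
    by_cases hg : g = []
    · subst hg
      simp only [List.map_cons, List.sum_cons, List.length_nil] at h
      obtain ⟨k, hk, hne⟩ := ih (by simpa using h)
      exact ⟨k + 1, by simpa using hk, by simpa using hne⟩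
    · exact ⟨0, by simp, by simpa using hg⟩

theorem pv_all_eq_singleton {α : Type} (l : List α) (a : α) (hnd : l.Nodup) (hne : l ≠ [])
    (h : ∀ x ∈ l, x = a) : l = [a] := by
  cases l with
  | nil => exact absurd rfl hne
  | cons x t =>
    have hx : x = a := h x (List.mem_cons_self)
    cases t with
    | nil => rw [hx]
    | cons y s =>
      have hy : y = a := h y (by simp)
      exfalso
      exact (List.nodup_cons.mp hnd).1 (by rw [hx, ← hy]; simp)

-- ===== initial state lemmas =====
theorem pv_build_len (l : List (List (String × String) × Nat)) (acc : List (List Int)) :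
    (l.foldl (fun bs g => PySem.List.pySetD bs ((g.1.length : Int))
      (PySem.List.pyGetD bs ((g.1.length : Int)) [] ++ [(g.2 : Int)])) acc).length = acc.length := by
  induction l generalizing acc with
  | nil => rfl
  | cons g t ih => rw [List.foldl_cons]; rw [ih]; simp

theorem pv_build_getD (l : List (List (String × String) × Nat)) :
    ∀ (acc : List (List Int)), (∀ g ∈ l, g.1.length < acc.length) →
    ∀ c : Nat, PySem.List.pyGetD (l.foldl (fun bs g => PySem.List.pySetD bs ((g.1.length : Int))
        (PySem.List.pyGetD bs ((g.1.length : Int)) [] ++ [(g.2 : Int)])) acc) (c : Int) []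
      = PySem.List.pyGetD acc (c : Int) [] ++ (l.filter (fun g => g.1.length = c)).map (fun g => ((g.2 : Int))) := by
  induction l with
  | nil => intro acc _ c; simp
  | cons g t ih =>
    intro acc hlt c
    rw [List.foldl_cons]
    have hg := hlt g (List.mem_cons_self)
    have hlen' : (PySem.List.pySetD acc ((g.1.length : Int)) (PySem.List.pyGetD acc ((g.1.length : Int)) [] ++ [(g.2 : Int)])).length = acc.length := by simp
    rw [ih _ (fun g' hg' => by rw [hlen']; exact hlt g' (List.mem_cons_of_mem _ hg')) c]
    rw [PySem.List.pyGetD_pySetD_natCast acc g.1.length c _ [] hg]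
    by_cases hc : c = g.1.length
    · subst hc
      rw [if_pos rfl, List.filter_cons_of_pos (by simp)]
      simp
    · rw [if_neg hc, List.filter_cons_of_neg (by simpa using fun hcc => hc hcc.symm)]

theorem pv_replicate_getD (m : Nat) (c : Nat) :
    PySem.List.pyGetD (List.replicate m ([] : List Int)) (c : Int) [] = [] := by
  rw [PySem.List.pyGetD_natCast, List.getD_eq_getElem?_getD, List.getElem?_replicate]
  split <;> rfl

theorem pv_posW_eq_zipform (itens : List (List (String × String))) (c : Nat) :
    pvPosW itens c = (itens.zipIdx.filter (fun g => g.1.length = c)).map (fun g => ((g.2 : Int))) := by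
  rw [pv_zipIdx_eq itens [], List.filter_map, List.map_map]
  unfold pvPosW pvBase
  rw [List.filter_map]
  apply congrArg
  apply List.filter_congr
  intro k _
  simp [pvCnt, Int.toNat_natCast]

theorem pv_buckets_init (itens : List (List (String × String))) (hne : ∀ g ∈ itens, g ≠ []) (c : Nat) :
    PySem.List.pyGetD (itens.zipIdx.foldl (fun bs g => PySem.List.pySetD bs ((g.1.length : Int))
        (PySem.List.pyGetD bs ((g.1.length : Int)) [] ++ [(g.2 : Int)]))
      (List.replicate ((itens.map List.length).foldl max 0 + 1) [])) (c : Int) []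
      = pvPosW itens c := by
  rw [pv_build_getD _ _ (fun g hg => by
    have h1 : g.1 ∈ itens := by
      rw [pv_zipIdx_eq itens []] at hg
      obtain ⟨k, hk, hgk⟩ := List.mem_map.mp hg
      have hk' : k < itens.length := List.mem_range.mp hk
      rw [← hgk]
      exact List.getD_eq_getElem itens [] hk' ▸ itens.getElem_mem hk'
    have h2 : g.1.length ∈ itens.map List.length := List.mem_map_of_mem h1
    have h3 := (pv_le_foldl_max (itens.map List.length) 0).1 _ h2
    rw [List.length_replicate]
    omega) c]
  rw [pv_replicate_getD, List.nil_append, pv_posW_eq_zipform]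

theorem pv_posW_above_max (itens : List (List (String × String))) (c : Nat)
    (hc : (itens.map List.length).foldl max 0 < c) : pvPosW itens c = [] := by
  unfold pvPosW
  rw [List.filter_eq_nil_iff]
  intro q hq
  obtain ⟨j, hj, hqj⟩ := pv_mem_base.mp hq
  subst hqj
  rw [pv_cnt_natCast]
  have h2 : (itens.getD j []).length ∈ itens.map List.length := by
    rw [List.getD_eq_getElem itens [] hj]
    exact List.mem_map_of_mem (itens.getElem_mem hj)
  have h3 := (pv_le_foldl_max (itens.map List.length) 0).1 _ h2
  simp only [decide_eq_true_eq]
  omega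

theorem pv_pend_init (ordem : List String) (grupos : PySem.Dict String (List (String × String))) :
    (ordem.zipIdx.filter (fun p => !(grupos.getD p.1 []).isEmpty)).map
      (fun p => ((p.2 : Int), p.1, grupos.getD p.1 []))
      = pvPend ordem (ordem.map (fun a => grupos.getD a [])) := by
  rw [pv_zipIdx_eq ordem "", List.filter_map, List.map_map]
  unfold pvPend pvBase
  rw [List.filter_map, List.map_map, List.length_map]
  have hgetD : ∀ k : Nat, k < ordem.length →
      (ordem.map (fun a => grupos.getD a [])).getD k [] = grupos.getD (ordem.getD k "") [] := by
    intro k hk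
    rw [List.getD_eq_getElem _ _ (by simpa using hk), List.getElem_map,
      List.getD_eq_getElem _ _ hk]
  have hfc : List.filter ((fun p : String × Nat => !(grupos.getD p.1 []).isEmpty) ∘
        (fun k : Nat => (ordem.getD k "", k))) (List.range ordem.length)
      = List.filter ((fun q : Int => decide (pvCnt (ordem.map (fun a => grupos.getD a [])) q ≠ 0)) ∘
        (fun k : Nat => (k : Int))) (List.range ordem.length) := by
    apply List.filter_congr
    intro k hk
    have hk' := List.mem_range.mp hk
    simp only [Function.comp, pvCnt, Int.toNat_natCast, hgetD k hk']
    cases grupos.getD (ordem.getD k "") [] <;> simp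
  rw [hfc]
  apply List.map_congr_left
  intro k hk
  obtain ⟨hkr, -⟩ := List.mem_filter.mp hk
  have hk' := List.mem_range.mp hkr
  simp only [Function.comp, Int.toNat_natCast, hgetD k hk']

theorem pv_group_sum (frases : List (String × String)) :
    ∀ st : PySem.Dict String (List (String × String)) × List String,
    st.1.keys = st.2 → st.2.Nodup →
    (((frases.foldl pvStepA st).2).map (fun a => ((frases.foldl pvStepA st).1.getD a []).length)).sum
      = (st.2.map (fun a => (st.1.getD a []).length)).sum + frases.length := by
  induction frases with
  | nil => intro st _ _; simp
  | cons p frases ih =>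
    intro st hk hnd
    rw [List.foldl_cons]
    by_cases hc : st.1.contains p.2 = true
    · have hmem : p.2 ∈ st.2 := by
        rw [← hk]
        rw [PySem.Dict.contains_eq_decide_mem_keys] at hc
        exact of_decide_eq_true hc
      have hkeys : (pvStepA st p).1.keys = (pvStepA st p).2 := by
        simp only [pvStepA, hc, if_true]
        show (st.1.modify p.2 [] (· ++ [p])).keys = st.2
        unfold PySem.Dict.modify
        rw [PySem.Dict.keys_insert_of_contains _ _ hc, hk]
      have hnd2 : (pvStepA st p).2.Nodup := by simpa [pvStepA, hc] using hnd
      rw [ih (pvStepA st p) hkeys hnd2]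
      have hsum2 : ((pvStepA st p).2.map (fun a => ((pvStepA st p).1.getD a []).length)).sum
          = (st.2.map (fun a => (st.1.getD a []).length)).sum + 1 := by
        simp only [pvStepA, hc, if_true]
        apply pv_sum_bump st.2 hnd p.2 hmem
        · intro x _ hxa
          show ((st.1.modify p.2 [] (· ++ [p])).getD x []).length = _
          unfold PySem.Dict.modify
          rw [PySem.Dict.getD_insert, if_neg (by exact fun hcc => hxa hcc)]
        · show ((st.1.modify p.2 [] (· ++ [p])).getD p.2 []).length = _
          unfold PySem.Dict.modify
          rw [PySem.Dict.getD_insert_self]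
          simp
      rw [hsum2]
      simp only [List.length_cons]
      omega
    · have hc' : st.1.contains p.2 = false := by simpa using hc
      have hmem : p.2 ∉ st.2 := by
        rw [← hk]
        intro hmm
        rw [PySem.Dict.contains_eq_decide_mem_keys, decide_eq_true hmm] at hc'
        exact Bool.true_eq_false.mp hc'
      have hkeys : (pvStepA st p).1.keys = (pvStepA st p).2 := by
        simp only [pvStepA, hc', Bool.false_eq_true, if_false]
        show (st.1.modify p.2 [] (· ++ [p])).keys = st.2 ++ [p.2]
        unfold PySem.Dict.modify
        rw [PySem.Dict.keys_insert_of_not_contains _ _ hc', hk]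
      have hnd2 : (pvStepA st p).2.Nodup := by
        simp only [pvStepA, hc', Bool.false_eq_true, if_false]
        rw [List.nodup_append]
        refine ⟨hnd, List.nodup_singleton _, ?_⟩
        intro a ha b hb
        simp only [List.mem_singleton] at hb
        exact fun hab => hmem ((hab.trans hb) ▸ ha)
      rw [ih (pvStepA st p) hkeys hnd2]
      have hsum2 : ((pvStepA st p).2.map (fun a => ((pvStepA st p).1.getD a []).length)).sum
          = (st.2.map (fun a => (st.1.getD a []).length)).sum + 1 := by
        simp only [pvStepA, hc', Bool.false_eq_true, if_false]
        rw [List.map_append, List.sum_append]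
        have h1 : st.2.map (fun a => ((st.1.modify p.2 [] (· ++ [p])).getD a []).length)
            = st.2.map (fun a => (st.1.getD a []).length) := by
          apply List.map_congr_left
          intro a ha
          unfold PySem.Dict.modify
          rw [PySem.Dict.getD_insert]
          split
          · rename_i hcc
            exact absurd (hcc ▸ ha) hmem
          · rfl
        have h2 : ((st.1.modify p.2 [] (· ++ [p])).getD p.2 []).length = 1 := by
          unfold PySem.Dict.modify
          rw [PySem.Dict.getD_insert_self, PySem.Dict.getD_of_not_contains st.1 [] hc']
          rfl
        rw [h1]
        simp only [List.map_cons, List.map_nil, List.sum_cons, List.sum_nil, h2]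
        omega
      rw [hsum2]
      simp only [List.length_cons]
      omega

-- ===== step lemmas =====
theorem pv_buckets_upd (itens : List (List (String × String))) (buckets : List (List Int))
    (k d : Nat) (hk : k < itens.length) (hd : (itens.getD k []).length = d) (hd1 : 1 ≤ d)
    (hdlen : d < buckets.length)
    (hbuck : ∀ c : Nat, 1 ≤ c → PySem.List.pyGetD buckets (c : Int) [] = pvPosW itens c)
    (t : List (String × String)) (htl : t = (itens.getD k []).tail) :
    ∀ c : Nat, 1 ≤ c →
    PySem.List.pyGetD
      (if 1 < d then
        PySem.List.pySetD
          (PySem.List.pySetD buckets (d : Int) ((PySem.List.remove? (PySem.List.pyGetD buckets (d : Int) []) ((k : Int))).getD []))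
          ((d : Int) - 1)
          (pvInsPos (PySem.List.pyGetD (PySem.List.pySetD buckets (d : Int) ((PySem.List.remove? (PySem.List.pyGetD buckets (d : Int) []) ((k : Int))).getD [])) ((d : Int) - 1) []) ((k : Int)))
      else
        PySem.List.pySetD buckets (d : Int) ((PySem.List.remove? (PySem.List.pyGetD buckets (d : Int) []) ((k : Int))).getD []))
      (c : Int) [] = pvPosW (itens.set k t) c := by
  have htlen : t.length = d - 1 := by
    rw [htl, List.length_tail]
    omega
  have htne : t.length ≠ (itens.getD k []).length := by omega
  have hkmem : (k : Int) ∈ pvPosW itens d := pv_mem_posW.mpr ⟨k, hk, rfl, hd⟩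
  have hrm : (PySem.List.remove? (PySem.List.pyGetD buckets (d : Int) []) ((k : Int))).getD []
      = (pvPosW itens d).erase ((k : Int)) := by
    rw [hbuck d hd1, PySem.List.remove?_eq_some_erase _ _ hkmem, Option.getD_some]
  intro c hc1
  rw [hrm]
  by_cases h1d : 1 < d
  · rw [if_pos h1d]
    have hcast : ((d : Int) - 1) = (((d - 1 : Nat)) : Int) := by omega
    rw [hcast]
    have hinner : PySem.List.pyGetD
        (PySem.List.pySetD buckets (d : Int) ((pvPosW itens d).erase ((k : Int)))) (((d - 1 : Nat)) : Int) []
        = pvPosW itens (d - 1) := by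
      rw [PySem.List.pyGetD_pySetD_natCast _ d (d - 1) _ [] hdlen, if_neg (by omega)]
      exact hbuck (d - 1) (by omega)
    rw [hinner]
    have hd1len : d - 1 < (PySem.List.pySetD buckets (d : Int) ((pvPosW itens d).erase ((k : Int)))).length := by
      rw [PySem.List.length_pySetD]
      omega
    rw [PySem.List.pyGetD_pySetD_natCast _ (d - 1) c _ [] hd1len]
    by_cases hcd1 : c = d - 1
    · rw [if_pos hcd1, hcd1, ← htlen, pv_posW_set_new itens k hk t htne]
    · rw [if_neg hcd1, PySem.List.pyGetD_pySetD_natCast _ d c _ [] hdlen]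
      by_cases hcd : c = d
      · rw [if_pos hcd, hcd, ← hd, pv_posW_set_old itens k hk t htne]
      · rw [if_neg hcd, hbuck c hc1,
          pv_posW_set_other itens k hk t c (by omega) (by omega)]
  · have hde : d = 1 := by omega
    rw [if_neg h1d]
    subst hde
    rw [PySem.List.pyGetD_pySetD_natCast _ 1 c _ [] hdlen]
    by_cases hcd : c = 1
    · rw [if_pos hcd, hcd, ← hd, pv_posW_set_old itens k hk t htne]
    · rw [if_neg hcd, hbuck c hc1,
        pv_posW_set_other itens k hk t c (by omega) (by omega)]

theorem pv_ult_corr (ordem : List String) (hnd : ordem.Nodup)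
    (itens : List (List (String × String))) (hlen : itens.length = ordem.length)
    (ultimo : Int) (ultimoM : Option String)
    (hult : (ultimo = -1 ∧ ultimoM = none) ∨
      ∃ u : Nat, u < itens.length ∧ ultimo = (u : Int) ∧ ultimoM = some (ordem.getD u ""))
    (m : Nat) (hm : m < itens.length) :
    (m : Int) ≠ ultimo ↔ some (ordem.getD m "") ≠ ultimoM := by
  rcases hult with ⟨h1, h2⟩ | ⟨u, hu, h1, h2⟩
  · subst h1; subst h2
    constructor
    · intro _ hc; exact Option.some_ne_none _ hc
    · intro _ hc; omega
  · subst h1; subst h2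
    constructor
    · intro hne hc
      apply hne
      have heq : ordem.getD m "" = ordem.getD u "" := Option.some.inj hc
      have hm' : m < ordem.length := hlen ▸ hm
      have hu' : u < ordem.length := hlen ▸ hu
      rw [List.getD_eq_getElem _ _ hm', List.getD_eq_getElem _ _ hu'] at heq
      have : m = u := (List.Nodup.getElem_inj_iff hnd).mp heq
      rw [this]
    · intro hne hc
      apply hne
      have : m = u := by exact_mod_cast hc
      rw [this]

theorem pv_select_some (ordem : List String) (hnd : ordem.Nodup)
    (itens : List (List (String × String))) (buckets : List (List Int)) (t' : Nat)
    (ultimo : Int) (ultimoM : Option String)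
    (hlen : itens.length = ordem.length)
    (hbuck : ∀ c : Nat, 1 ≤ c → PySem.List.pyGetD buckets (c : Int) [] = pvPosW itens c)
    (ht_above : ∀ c : Nat, t' < c → PySem.List.pyGetD buckets (c : Int) [] = [])
    (hult : (ultimo = -1 ∧ ultimoM = none) ∨
      ∃ u : Nat, u < itens.length ∧ ultimo = (u : Int) ∧ ultimoM = some (ordem.getD u ""))
    (d : Nat) (p : Int)
    (hscan : pvScan buckets ultimo t' = some (d, p)) :
    ∃ k : Nat, k < itens.length ∧ p = (k : Int) ∧ (itens.getD k []).length = d ∧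
      itens.getD k [] ≠ [] ∧ 1 ≤ d ∧ d ≤ t' ∧
      ((pvPend ordem itens).filter (fun e => some e.2.1 != ultimoM)) ≠ [] ∧
      PySem.List.min2? ((pvPend ordem itens).filter (fun e => some e.2.1 != ultimoM))
        (fun e => -(e.2.2.length : Int)) (fun e => e.1)
        = some ((k : Int), ordem.getD k "", itens.getD k []) := by
  obtain ⟨hd1, hdt, hfind, hup⟩ := pv_scan_some buckets ultimo t' d p hscan
  obtain ⟨hpred, l1, l2, hsplit, hl1⟩ := List.find?_eq_some_iff_append.mp hfind
  have hl1' : ∀ a ∈ l1, a = ultimo := by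
    intro a ha
    have := hl1 a ha
    simpa using this
  have hpne : p ≠ ultimo := by simpa using hpred
  have hbd := hbuck d hd1
  have hpmem : p ∈ pvPosW itens d := by
    rw [← hbd, hsplit]
    exact List.mem_append_right _ (List.mem_cons_self)
  obtain ⟨k, hk, hpk, hkd⟩ := pv_mem_posW.mp hpmem
  have hkne : itens.getD k [] ≠ [] := by
    intro hc
    rw [hc] at hkd
    simp at hkd
    omega
  have hePend : ((k : Int), ordem.getD k "", itens.getD k []) ∈ pvPend ordem itens :=
    pv_mem_pend.mpr ⟨k, hk, hkne, rfl⟩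
  have hkult : (k : Int) ≠ ultimo := hpk ▸ hpne
  have heaut : (some (ordem.getD k "") != ultimoM) = true := by
    have := (pv_ult_corr ordem hnd itens hlen ultimo ultimoM hult k hk).mp hkult
    simpa using this
  have heOut : ((k : Int), ordem.getD k "", itens.getD k []) ∈
      (pvPend ordem itens).filter (fun e => some e.2.1 != ultimoM) :=
    List.mem_filter.mpr ⟨hePend, heaut⟩
  refine ⟨k, hk, hpk, hkd, hkne, hd1, hdt, List.ne_nil_of_mem heOut, ?_⟩
  apply pv_min2_strict _ _ _ _ heOut
  intro y hy hyne
  obtain ⟨hyPend, hyaut⟩ := List.mem_filter.mp hy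
  obtain ⟨m, hm, hmne, hym⟩ := pv_mem_pend.mp hyPend
  subst hym
  have hmk : m ≠ k := by
    intro hc
    subst hc
    exact hyne rfl
  have hmu : (m : Int) ≠ ultimo := by
    have h2 : some (ordem.getD m "") ≠ ultimoM := by simpa using hyaut
    exact (pv_ult_corr ordem hnd itens hlen ultimo ultimoM hult m hm).mpr h2
  have hcm1 : 1 ≤ (itens.getD m []).length := by
    have := List.length_pos_iff.mpr hmne
    omega
  have hmmem : (m : Int) ∈ pvPosW itens ((itens.getD m []).length) :=
    pv_mem_posW.mpr ⟨m, hm, rfl, rfl⟩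
  have hcmt' : (itens.getD m []).length ≤ t' := by
    by_contra hgt
    push_neg at hgt
    have h0 := ht_above _ hgt
    rw [hbuck _ hcm1] at h0
    rw [h0] at hmmem
    simp at hmmem
  have hcmd : (itens.getD m []).length ≤ d := by
    by_contra hgt
    push_neg at hgt
    have h3 := hup _ hgt hcmt' (m : Int) (by rw [hbuck _ hcm1]; exact hmmem)
    exact hmu h3
  rcases Nat.lt_or_ge (itens.getD m []).length d with hlt | hge
  · left
    simp only
    omega
  · have hcmd' : (itens.getD m []).length = d := by omega
    right
    constructor
    · simp only
      omega
    · simp only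
      have hmbd : (m : Int) ∈ l1 ++ p :: l2 := by
        rw [← hsplit, hbd]
        exact hcmd' ▸ hmmem
      have heq2 : pvPosW itens d = l1 ++ p :: l2 := by rw [← hbd, hsplit]
      have hpw : (l1 ++ p :: l2).Pairwise (· < ·) := heq2 ▸ pv_posW_pairwise itens d
      rcases List.mem_append.mp hmbd with hin1 | hin2
      · exact absurd (hl1' _ hin1) hmu
      · rcases List.mem_cons.mp hin2 with he | hin3
        · exfalso
          apply hmk
          have : (m : Int) = (k : Int) := he.trans hpk
          exact_mod_cast this
        · have hplt : p < (m : Int) :=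
            (List.pairwise_cons.mp (List.pairwise_append.mp hpw).2.1).1 _ hin3
          rw [← hpk]
          exact hplt

theorem pv_select_none (ordem : List String) (hnd : ordem.Nodup)
    (itens : List (List (String × String))) (buckets : List (List Int)) (t' : Nat)
    (ultimo : Int) (ultimoM : Option String)
    (hlen : itens.length = ordem.length)
    (hbuck : ∀ c : Nat, 1 ≤ c → PySem.List.pyGetD buckets (c : Int) [] = pvPosW itens c)
    (ht_above : ∀ c : Nat, t' < c → PySem.List.pyGetD buckets (c : Int) [] = [])
    (hult : (ultimo = -1 ∧ ultimoM = none) ∨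
      ∃ u : Nat, u < itens.length ∧ ultimo = (u : Int) ∧ ultimoM = some (ordem.getD u ""))
    (hscan : pvScan buckets ultimo t' = none)
    (hne_t : PySem.List.pyGetD buckets ((t' : Nat) : Int) [] ≠ [] ∨ t' = 0)
    (k0 : Nat) (hk0 : k0 < itens.length) (hk0ne : itens.getD k0 [] ≠ []) :
    ∃ u : Nat, u < itens.length ∧ ultimo = (u : Int) ∧ itens.getD u [] ≠ [] ∧
      (itens.getD u []).length = t' ∧ 1 ≤ t' ∧
      pvPend ordem itens = [((u : Int), ordem.getD u "", itens.getD u [])] ∧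
      ((pvPend ordem itens).filter (fun e => some e.2.1 != ultimoM)) = [] ∧
      (PySem.List.pyGetD buckets ((t' : Nat) : Int) []).headD 0 = (u : Int) ∧
      ultimoM = some (ordem.getD u "") := by
  have hall := pv_scan_none buckets ultimo t' hscan
  have hlive_le : ∀ m : Nat, m < itens.length → itens.getD m [] ≠ [] →
      (itens.getD m []).length ≤ t' := by
    intro m hm hmne
    have hcm1 : 1 ≤ (itens.getD m []).length := by
      have := List.length_pos_iff.mpr hmne
      omega
    by_contra hgt
    push_neg at hgt
    have h0 := ht_above _ hgt
    rw [hbuck _ hcm1] at h0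
    have hmm : (m : Int) ∈ pvPosW itens ((itens.getD m []).length) :=
      pv_mem_posW.mpr ⟨m, hm, rfl, rfl⟩
    rw [h0] at hmm
    simp at hmm
  have hlive_ult : ∀ m : Nat, m < itens.length → itens.getD m [] ≠ [] → (m : Int) = ultimo := by
    intro m hm hmne
    have hcm1 : 1 ≤ (itens.getD m []).length := by
      have := List.length_pos_iff.mpr hmne
      omega
    exact hall _ hcm1 (hlive_le m hm hmne) (m : Int)
      (by rw [hbuck _ hcm1]; exact pv_mem_posW.mpr ⟨m, hm, rfl, rfl⟩)
  have hult0 := hlive_ult k0 hk0 hk0ne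
  rcases hult with ⟨h1, _⟩ | ⟨u, hu, h1, h2⟩
  · exfalso
    rw [h1] at hult0
    omega
  · subst h1
    have hku : u = k0 := by exact_mod_cast hult0.symm
    subst hku
    have ht'1 : 1 ≤ t' := by
      have := hlive_le u hk0 hk0ne
      have h2' := List.length_pos_iff.mpr hk0ne
      omega
    have hposW : pvPosW itens t' = [(u : Int)] := by
      apply pv_all_eq_singleton _ _ ((pv_base_pairwise _).filter _).nodup
      · rcases hne_t with hbt | ht0
        · rw [hbuck t' ht'1] at hbt
          exact hbt
        · omega
      · intro x hx
        obtain ⟨m, hm, hxm, hmc⟩ := pv_mem_posW.mp hx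
        have hmne : itens.getD m [] ≠ [] := by
          intro hc
          rw [hc] at hmc
          simp at hmc
          omega
        rw [hxm]
        exact hlive_ult m hm hmne
    have hulen : (itens.getD u []).length = t' := by
      have : (u : Int) ∈ pvPosW itens t' := by rw [hposW]; exact List.mem_cons_self
      obtain ⟨m, hm, hum, hmc⟩ := pv_mem_posW.mp this
      have : u = m := by exact_mod_cast hum
      rw [this]
      exact hmc
    have hpend : pvPend ordem itens = [((u : Int), ordem.getD u "", itens.getD u [])] := by
      apply pv_all_eq_singleton
      · unfold pvPend
        apply List.Nodup.map
        · intro a b hab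
          exact congrArg Prod.fst hab
        · exact ((pv_base_pairwise _).filter _).nodup
      · exact List.ne_nil_of_mem (pv_mem_pend.mpr ⟨u, hk0, hk0ne, rfl⟩)
      · intro x hx
        obtain ⟨m, hm, hmne, hxm⟩ := pv_mem_pend.mp hx
        have hmu : (m : Int) = (u : Int) := hlive_ult m hm hmne
        have : m = u := by exact_mod_cast hmu
        subst this
        exact hxm
    refine ⟨u, hk0, rfl, hk0ne, hulen, ht'1, hpend, ?_, ?_, h2⟩
    · rw [hpend]
      rw [List.filter_cons_of_neg (by simp [h2])]
      rfl
    · rw [hbuck t' ht'1, hposW]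
      rfl

theorem pv_mid_eq_bkt (ordem : List String) (hnd : ordem.Nodup) :
    ∀ (fuel : Nat) (itens : List (List (String × String))) (buckets : List (List Int))
      (topo : Nat) (ultimo : Int) (ultimoM : Option String) (res : List (String × String)),
    itens.length = ordem.length →
    (∀ c : Nat, 1 ≤ c → PySem.List.pyGetD buckets (c : Int) [] = pvPosW itens c) →
    topo < buckets.length →
    (∀ c : Nat, topo < c → pvPosW itens c = []) →
    ((ultimo = -1 ∧ ultimoM = none) ∨
      ∃ u : Nat, u < itens.length ∧ ultimo = (u : Int) ∧ ultimoM = some (ordem.getD u "")) →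
    (itens.map List.length).sum = fuel →
    pvLoopB fuel (pvPend ordem itens) ultimoM res = pvLoopBkt fuel itens buckets topo ultimo res := by
  intro fuel
  induction fuel with
  | zero => intro itens buckets topo ultimo ultimoM res _ _ _ _ _ _; rfl
  | succ fuel ih =>
    intro itens buckets topo ultimo ultimoM res hlen hbuck htopo habove hult hsum
    have hab0 : ∀ c : Nat, topo < c → PySem.List.pyGetD buckets (c : Int) [] = [] := by
      intro c hc
      rw [hbuck c (by omega)]
      exact habove c hc
    obtain ⟨ht_le, ht_above, ht_ne⟩ := pv_lower_spec buckets topo hab0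
    obtain ⟨k0, hk0, hk0ne⟩ := pv_exists_live itens (by rw [hsum]; omega)
    have hpendne : pvPend ordem itens ≠ [] :=
      List.ne_nil_of_mem (pv_mem_pend.mpr ⟨k0, hk0, hk0ne, rfl⟩)
    have hpe : (pvPend ordem itens).isEmpty = false :=
      Bool.eq_false_iff.mpr (fun hc => hpendne (List.isEmpty_iff.mp hc))
    cases hscan : pvScan buckets ultimo (pvLowerTopo buckets topo) with
    | some dp =>
      obtain ⟨d, p⟩ := dp
      obtain ⟨k, hk, hpk, hkd, hkne, hd1, hdt, houtne, hmin⟩ :=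
        pv_select_some ordem hnd itens buckets (pvLowerTopo buckets topo)
          ultimo ultimoM hlen hbuck ht_above hult d p hscan
      subst hpk
      obtain ⟨h1, t, hq⟩ : ∃ h1 t, itens.getD k [] = h1 :: t := by
        cases hqq : itens.getD k [] with
        | nil => exact absurd hqq hkne
        | cons a b => exact ⟨a, b, rfl⟩
      have hoE : ((pvPend ordem itens).filter (fun e => some e.2.1 != ultimoM)).isEmpty = false :=
        Bool.eq_false_iff.mpr (fun hc => houtne (List.isEmpty_iff.mp hc))
      have htsum : t.length + 1 = d := by
        rw [← hkd, hq]
        rfl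
      simp only [pvLoopB, pvLoopBkt, hpe, hoE, hscan, hmin, Bool.false_eq_true, if_false,
        PySem.List.pyGetD_natCast, hq, List.headD_cons, List.tail_cons,
        PySem.List.pySetD_natCast]
      have hpend' : (if t.isEmpty = true
            then (pvPend ordem itens).filter (fun e' => e'.1 != ((k : Int)))
            else (pvPend ordem itens).map (fun e' => if e'.1 == (k : Int) then (e'.1, e'.2.1, t) else e'))
          = pvPend ordem (itens.set k t) := by
        by_cases ht0 : t.isEmpty = true
        · have htnil : t = [] := List.isEmpty_iff.mp ht0
          subst htnil
          rw [if_pos ht0]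
          exact (pv_pend_upd_nil ordem itens k hk).symm
        · have ht0' : t ≠ [] := fun hc => ht0 (by rw [hc]; rfl)
          rw [if_neg ht0]
          exact (pv_pend_upd_tail ordem itens k hk t ht0' hkne).symm
      rw [hpend']
      refine ih (itens.set k t) _ (pvLowerTopo buckets topo) ((k : Int))
        (some (ordem.getD k "")) (res ++ [h1]) (by simpa using hlen) ?_ ?_ ?_ ?_ ?_
      · -- bucket invariant after the update
        have := pv_buckets_upd itens buckets k d hk hkd hd1 (by omega) hbuck t
          (by rw [hq]; rfl)
        simpa [PySem.List.pySetD_natCast] using this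
      · -- topo bound
        split <;> simp only [PySem.List.length_pySetD, List.length_set] <;> omega
      · -- counts above topo' are absent
        intro c hc
        rw [pv_posW_set_other itens k hk t c (by omega) (by omega)]
        rw [← hbuck c (by omega), ht_above c hc]
      · exact Or.inr ⟨k, by simpa using hk, rfl, rfl⟩
      · rw [List.map_set]
        have hgd : (itens.map List.length).getD k 0 = d := by
          rw [List.getD_eq_getElem _ _ (by simpa using hk), List.getElem_map]
          rw [← hkd, List.getD_eq_getElem _ _ hk]
        have := pv_sum_set (itens.map List.length) k t.length (by simpa using hk)
        rw [hgd] at this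
        omega
    | none =>
      obtain ⟨u, hu, hulteq, hune, hulen, ht'1, hpend, houtE, hheadD, hultM⟩ :=
        pv_select_none ordem hnd itens buckets (pvLowerTopo buckets topo)
          ultimo ultimoM hlen hbuck ht_above hult hscan ht_ne k0 hk0 hk0ne
      subst hulteq
      obtain ⟨h1, t, hq⟩ : ∃ h1 t, itens.getD u [] = h1 :: t := by
        cases hqq : itens.getD u [] with
        | nil => exact absurd hqq hune
        | cons a b => exact ⟨a, b, rfl⟩
      have htsum : t.length + 1 = (pvLowerTopo buckets topo) := by
        rw [← hulen, hq]
        rfl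
      have hminS : PySem.List.min2? ((pvPend ordem itens))
          (fun e => -(e.2.2.length : Int)) (fun e => e.1)
          = some ((u : Int), ordem.getD u "", itens.getD u []) := by
        rw [hpend]
        exact pv_min2_strict _ _ _ _ (List.mem_cons_self)
          (fun y hy hyne => absurd (List.mem_singleton.mp hy) hyne)
      have hheadD' : ((buckets.getD (pvLowerTopo buckets topo) ([] : List Int)).headD 0) = (u : Int) := by
        simpa using hheadD
      simp only [pvLoopB, pvLoopBkt, hpe, hscan, houtE, List.isEmpty_nil, if_true,
        hminS, Bool.false_eq_true, if_false,
        PySem.List.pyGetD_natCast, hheadD', hq, List.headD_cons, List.tail_cons,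
        PySem.List.pySetD_natCast]
      have hpend' : (if t.isEmpty = true
            then (pvPend ordem itens).filter (fun e' => e'.1 != ((u : Int)))
            else (pvPend ordem itens).map (fun e' => if e'.1 == (u : Int) then (e'.1, e'.2.1, t) else e'))
          = pvPend ordem (itens.set u t) := by
        by_cases ht0 : t.isEmpty = true
        · have htnil : t = [] := List.isEmpty_iff.mp ht0
          subst htnil
          rw [if_pos ht0]
          exact (pv_pend_upd_nil ordem itens u hu).symm
        · have ht0' : t ≠ [] := fun hc => ht0 (by rw [hc]; rfl)
          rw [if_neg ht0]
          exact (pv_pend_upd_tail ordem itens u hu t ht0' hune).symm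
      rw [hpend']
      refine ih (itens.set u t) _ (pvLowerTopo buckets topo) ((u : Int))
        (some (ordem.getD u "")) (res ++ [h1]) (by simpa using hlen) ?_ ?_ ?_ ?_ ?_
      · have := pv_buckets_upd itens buckets u (pvLowerTopo buckets topo) hu hulen ht'1
          (by omega) hbuck t (by rw [hq]; rfl)
        simpa [PySem.List.pySetD_natCast] using this
      · split <;> simp only [PySem.List.length_pySetD, List.length_set] <;> omega
      · intro c hc
        rw [pv_posW_set_other itens u hu t c (by omega) (by omega)]
        rw [← hbuck c (by omega), ht_above c hc]
      · exact Or.inr ⟨u, by simpa using hu, rfl, rfl⟩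
      · rw [List.map_set]
        have hgd : (itens.map List.length).getD u 0 = (pvLowerTopo buckets topo) := by
          rw [List.getD_eq_getElem _ _ (by simpa using hu), List.getElem_map]
          rw [← hulen, List.getD_eq_getElem _ _ hu]
        have := pv_sum_set (itens.map List.length) u t.length (by simpa using hu)
        rw [hgd] at this
        omega

-- ===== VERDICT (by name: the statement is the Claim_ definition above) =====
theorem intercalar_por_autor_py_spec : Claim_equal_intercalar_por_autor_py := by
  intro frases _
  unfold Spec_intercalar_por_autor_py
  obtain ⟨hk, hnd, hne⟩ := pv_group_inv frases
  rw [pv_A_eq_mid]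
  unfold intercalar_por_autor_py_alt pvBuckets0 pvMaxc0 pvItens0
  rw [pv_groupB_eq_groupA]
  rw [pv_pend_init (pvGroupA frases).2 (pvGroupA frases).1]
  apply pv_mid_eq_bkt (pvGroupA frases).2 hnd frases.length _ _ _ _ _ []
  · simp
  · intro c _
    exact pv_buckets_init _ (fun g hg => by
      obtain ⟨a, ha, hga⟩ := List.mem_map.mp hg
      rw [← hga]
      exact hne a ha) c
  · rw [pv_build_len, List.length_replicate]
    omega
  · intro c hc
    exact pv_posW_above_max _ c hc
  · exact Or.inl ⟨rfl, rfl⟩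
  · rw [List.map_map]
    have := pv_group_sum frases (PySem.Dict.empty, []) rfl List.nodup_nil
    unfold pvGroupA
    simpa using this
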